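-- pv_equiv track=rewrite | github.com/tanmayagarwal1/Code | Algorithms/array_alogs.py | revspecialutil
-- ===== SOURCE A (Python) =====
-- def revspecialutil(arr):
--     n=len(arr)
--     index=-1
--     for i in range(n-1,n//2,-1):
--         if arr[i].isalpha():
--             temp = arr[i]
--             while True:
--                 index+=1
--                 if arr[index].isalpha():
--                     arr[index],temp=temp,arr[index]
--                     break
--     return arr
-- ===== SOURCE B (Python) =====
-- def revspecialutil(arr):
--     # One pass builds the index tables, then a single pairing loop performs A's
--     # interleaved pointer-scan writes in the same order.
--     n = len(arr)
--     P = [i for i, s in enumerate(arr) if s.isalpha()]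
--     R = [i for i in range(n - 1, n // 2, -1) if arr[i].isalpha()]
--     for k, r in enumerate(R):
--         arr[P[k]] = arr[r]
--     return arr
-- ===== Notes on version B (the rewrite author's own statement) =====
-- stated objective: alternative
-- what changed: Replaces A's interleaved never-reset front-pointer scan with inner while-loop by a one-pass construction of two index tables (all alpha positions ascending, back-half alpha positions descending) followed by a single pairing loop of direct assignments.
import Mathlib
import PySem

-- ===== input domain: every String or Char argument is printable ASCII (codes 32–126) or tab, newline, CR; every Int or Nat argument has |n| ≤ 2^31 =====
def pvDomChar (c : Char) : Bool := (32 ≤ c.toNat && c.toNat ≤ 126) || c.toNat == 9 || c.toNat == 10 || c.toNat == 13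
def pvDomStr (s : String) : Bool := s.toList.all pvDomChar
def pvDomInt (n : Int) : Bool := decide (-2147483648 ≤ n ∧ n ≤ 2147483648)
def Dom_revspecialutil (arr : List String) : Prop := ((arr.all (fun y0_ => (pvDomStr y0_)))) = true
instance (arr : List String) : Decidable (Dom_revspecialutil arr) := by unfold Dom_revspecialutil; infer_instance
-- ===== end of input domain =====

-- B replaces A's interleaved never-reset front-pointer scan (inner while loop) by two
-- precomputed index tables and one pairing loop of direct assignments: alternative
-- decomposition, same cost.  Both A and B mutate `arr` in place in Python (identically);
-- the ports and the equivalence proved here are about the returned list.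

-- ===== PORT A =====
-- A's inner 'while True: index += 1; if arr[index].isalpha(): arr[index],temp = temp,arr[index]; break'.
-- Fuel bounds the scan; fuel exhaustion / the `none` (IndexError) branch are unreachable
-- when `arr` is a list of strings (the scan always finds an alpha cell first — proved below).
def revspecialutilScan (fuel : Nat) (arr : List String) (index : Int) (temp : String) :
    List String × Int :=
  match fuel with
  | 0 => (arr, index)
  | Nat.succ fuel =>
    let index := index + 1
    match PySem.List.pyGet? arr index with
    | none => (arr, index)      -- Python IndexError; unreachable here
    | some v =>
      if PySem.Str.strIsalpha v then
        (PySem.List.pySetD arr index temp, index)   -- arr[index] = temp; break (temp discarded)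
      else revspecialutilScan fuel arr index temp

def revspecialutil (arr : List String) : List String :=
  let n : Int := arr.length
  (((PySem.List.pyRange (n - 1) (PySem.Int.floordiv n 2) (-1)).foldl
    (fun st i =>
      match PySem.List.pyGet? st.1 i with
      | none => st                                  -- IndexError; unreachable here
      | some s =>
        if PySem.Str.strIsalpha s then
          revspecialutilScan st.1.length st.1 st.2 s
        else st)
    (arr, (-1 : Int))).1)

-- ===== PORT B =====
def revspecialutil_alt (arr : List String) : List String :=
  let n : Int := arr.length
  let P : List Int := (PySem.List.enumerate arr).filterMap
    (fun p => if PySem.Str.strIsalpha p.2 then some p.1 else none)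
  let R : List Int := (PySem.List.pyRange (n - 1) (PySem.Int.floordiv n 2) (-1)).filter
    (fun i => match PySem.List.pyGet? arr i with
              | some s => PySem.Str.strIsalpha s
              | none => false)
  (PySem.List.enumerate R).foldl
    (fun a p =>
      match PySem.List.pyGet? P p.1, PySem.List.pyGet? a p.2 with
      | some q, some v => PySem.List.pySetD a q v
      | _, _ => a)                                  -- IndexError; unreachable here
    arr

-- ===== PRECONDITION & SPEC =====
def Spec_revspecialutil (arr : List String) (out : List String) : Prop := out = revspecialutil_alt arr
instance (arr : List String) (out : List String) : Decidable (Spec_revspecialutil arr out) := by unfold Spec_revspecialutil; infer_instance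

-- ===== CLAIM (what is proved, stated in full; the proofs are below) =====
def Claim_equal_revspecialutil : Prop := ∀ (arr : List String), Dom_revspecialutil arr → Spec_revspecialutil arr (revspecialutil arr)

-- ===== LEMMAS AND PROOFS =====

-- Boolean alpha-status of position i of a (exactly the test both ports perform).
def alphaAt (a : List String) (i : Int) : Bool :=
  match PySem.List.pyGet? a i with
  | some s => PySem.Str.strIsalpha s
  | none => false

-- The ascending list of alpha positions of arr0 strictly above idx.
def alphasAbove (arr0 : List String) (idx : Int) : List Int :=
  (PySem.List.pyRange 0 (arr0.length : Int) 1).filter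
    (fun m => decide (idx < m) && alphaAt arr0 m)

theorem alphaAt_true_bounds {a : List String} {i : Int} (h : alphaAt a i = true) (h0 : 0 ≤ i) :
    i < (a.length : Int) := by
  unfold alphaAt at h
  rw [PySem.List.pyGet?_of_nonneg a h0] at h
  cases h' : a[i.toNat]? with
  | none => rw [h'] at h; simp at h
  | some v =>
    obtain ⟨hlt, -⟩ := List.getElem?_eq_some_iff.mp h'
    omega

theorem alphaAt_some {a : List String} {i : Int} (h0 : 0 ≤ i) (hi : i < (a.length : Int)) :
    PySem.List.pyGet? a i = some (a.getD i.toNat "") := by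
  have h : i.toNat < a.length := by omega
  rw [PySem.List.pyGet?_of_nonneg a h0, List.getElem?_eq_getElem h,
    List.getD_eq_getElem?_getD, List.getElem?_eq_getElem h]
  rfl

-- filterMap with an if-some-else-none is a filter
theorem filterMap_if_eq_filter (l : List Int) (p : Int → Bool) :
    l.filterMap (fun x => if p x then some x else none) = l.filter p := by
  induction l with
  | nil => rfl
  | cons x xs ih =>
    by_cases h : p x <;> simp [h, ih]

-- head/tail structure of `alphasAbove`-style filters of a sorted list
theorem filter_sorted_head {l : List Int} (hl : l.Pairwise (· < ·)) {idx j : Int} {t : List Int}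
    {α : Int → Bool}
    (h : l.filter (fun m => decide (idx < m) && α m) = j :: t) :
    α j = true ∧ idx < j ∧ j ∈ l ∧ (∀ m ∈ l, idx < m → m < j → α m = false) ∧
      t = l.filter (fun m => decide (j < m) && α m) := by
  induction l generalizing j t with
  | nil => simp at h
  | cons x xs ih =>
    have hx : ∀ y ∈ xs, x < y := fun y hy => (List.pairwise_cons.mp hl).1 y hy
    have hxs : xs.Pairwise (· < ·) := (List.pairwise_cons.mp hl).2
    rw [List.filter_cons] at h
    by_cases hc : (decide (idx < x) && α x) = true
    · rw [if_pos hc] at h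
      obtain ⟨hjx, ht⟩ : j = x ∧ t = xs.filter (fun m => decide (idx < m) && α m) := by
        constructor <;> [exact (List.cons.injEq _ _ _ _ ▸ h).1.symm;
          exact ((List.cons.injEq _ _ _ _ ▸ h).2).symm]
      subst hjx
      have hα : α j = true := (Bool.and_eq_true_iff.mp hc).2
      have hidx : idx < j := of_decide_eq_true (Bool.and_eq_true_iff.mp hc).1
      refine ⟨hα, hidx, List.mem_cons_self, ?_, ?_⟩
      · intro m hm h1 h2
        rcases List.mem_cons.mp hm with rfl | hm'
        · omega
        · exact absurd (hx m hm') (by omega)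
      · rw [ht, List.filter_cons, if_neg (by simp)]
        refine List.filter_congr ?_
        intro m hm
        have := hx m hm
        simp [show idx < m by omega, this]
    · rw [if_neg hc] at h
      obtain ⟨hα, hidx, hmem, hmin, ht⟩ := ih hxs h
      refine ⟨hα, hidx, List.mem_cons_of_mem _ hmem, ?_, ?_⟩
      · intro m hm h1 h2
        rcases List.mem_cons.mp hm with rfl | hm'
        · have : ¬ (decide (idx < m) && α m) = true := hc
          simpa [h1] using this
        · exact hmin m hm' h1 h2
      · rw [ht, List.filter_cons, if_neg (by
          have := hx j hmem
          simp [show ¬ j < x by omega])]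

-- the scan finds the least alpha position above idx and writes temp there
theorem scan_spec (a : List String) (fuel : Nat) :
    ∀ (idx : Int) (temp : String) (j : Int),
    -1 ≤ idx → idx < j → alphaAt a j = true →
    (∀ m : Int, idx < m → m < j → alphaAt a m = false) →
    j - idx ≤ (fuel : Int) →
    revspecialutilScan fuel a idx temp = (PySem.List.pySetD a j temp, j) := by
  induction fuel with
  | zero => intro idx temp j h0 hij hα hmin hfuel; exfalso; omega
  | succ fuel ih =>
    intro idx temp j h0 hij hα hmin hfuel
    have hjlt : j < (a.length : Int) := alphaAt_true_bounds hα (by omega)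
    have hsome : PySem.List.pyGet? a (idx + 1) = some (a.getD (idx + 1).toNat "") :=
      alphaAt_some (by omega) (by omega)
    have hval : ∀ i : Int, 0 ≤ i → i < (a.length : Int) →
        alphaAt a i = PySem.Str.strIsalpha (a.getD i.toNat "") := by
      intro i hi1 hi2; unfold alphaAt; rw [alphaAt_some hi1 hi2]
    show (match PySem.List.pyGet? a (idx + 1) with
      | none => (a, idx + 1)
      | some v =>
        if PySem.Str.strIsalpha v then (PySem.List.pySetD a (idx + 1) temp, idx + 1)
        else revspecialutilScan fuel a (idx + 1) temp) = (PySem.List.pySetD a j temp, j)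
    rw [hsome]
    by_cases hej : idx + 1 = j
    · have : PySem.Str.strIsalpha (a.getD (idx + 1).toNat "") = true := by
        rw [← hval (idx + 1) (by omega) (by omega), hej, hα]
      subst hej
      simp only [this, if_pos]
    · have : PySem.Str.strIsalpha (a.getD (idx + 1).toNat "") = false := by
        rw [← hval (idx + 1) (by omega) (by omega)]
        exact hmin (idx + 1) (by omega) (by omega)
      simp only [this, Bool.false_eq_true, if_false]
      exact ih (idx + 1) temp j (by omega) (by omega) hα
        (fun m h1 h2 => hmin m (by omega) h2) (by omega)

theorem alphaAt_set (a : List String) (j : Int) (s : String) (h0 : 0 ≤ j)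
    (m : Int) (hm0 : 0 ≤ m) (hm : m < (a.length : Int)) :
    alphaAt (PySem.List.pySetD a j s) m =
      if m = j then PySem.Str.strIsalpha s else alphaAt a m := by
  rw [PySem.List.pySetD_of_nonneg a s h0]
  unfold alphaAt
  rw [PySem.List.pyGet?_of_nonneg _ hm0, PySem.List.pyGet?_of_nonneg _ hm0]
  rw [List.getElem?_set]
  by_cases hej : m = j
  · simp [hej, show j.toNat = m.toNat by omega, show m.toNat < a.length by omega]
  · rw [if_neg hej]; simp [show ¬ j.toNat = m.toNat by omega]

-- the main loop invariant: A's pointer fold = B's pairing fold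
theorem main_inv (arr0 : List String) (Pfull : List Int) :
    ∀ (bs : List Int) (a : List String) (idx : Int) (kd rem : List Int),
    a.length = arr0.length →
    (∀ m : Int, 0 ≤ m → m < (arr0.length : Int) → alphaAt a m = alphaAt arr0 m) →
    Pfull = kd ++ rem →
    rem = alphasAbove arr0 idx →
    -1 ≤ idx →
    (∀ i ∈ bs, 0 ≤ i ∧ i < (arr0.length : Int)) →
    ((bs.filter (fun i => alphaAt arr0 i)).length) ≤ rem.length →
    (bs.foldl
      (fun st i =>
        match PySem.List.pyGet? st.1 i with
        | none => st
        | some s =>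
          if PySem.Str.strIsalpha s then
            revspecialutilScan st.1.length st.1 st.2 s
          else st)
      (a, idx)).1 =
    (PySem.List.enumerate (bs.filter (fun i => alphaAt arr0 i)) (kd.length : Int)).foldl
      (fun b p =>
        match PySem.List.pyGet? Pfull p.1, PySem.List.pyGet? b p.2 with
        | some q, some v => PySem.List.pySetD b q v
        | _, _ => b)
      a := by
  intro bs
  induction bs with
  | nil => intro a idx kd rem _ _ _ _ _ _ _; simp [PySem.List.enumerate_nil]
  | cons i bs ih =>
    intro a idx kd rem Hlen Hst HP Hrem Hidx Hbs Hcnt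
    obtain ⟨hi0, hin⟩ := Hbs i List.mem_cons_self
    have hilen : i < (a.length : Int) := by omega
    have hsome_i : PySem.List.pyGet? a i = some (a.getD i.toNat "") := alphaAt_some hi0 hilen
    have hsA : alphaAt a i = PySem.Str.strIsalpha (a.getD i.toNat "") := by
      unfold alphaAt; rw [hsome_i]
    rw [List.foldl_cons, List.filter_cons]
    by_cases hα : alphaAt arr0 i = true
    · -- alpha cell in the back half: A scans and writes, B pairs and writes
      have hsi : PySem.Str.strIsalpha (a.getD i.toNat "") = true := by
        rw [← hsA, Hst i hi0 hin, hα]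
      cases hrem : rem with
      | nil =>
        exfalso
        rw [hrem] at Hcnt
        simp [hα] at Hcnt
      | cons j rem' =>
        have hhead : (PySem.List.pyRange 0 ((arr0.length : Int)) 1).filter
            (fun m => decide (idx < m) && alphaAt arr0 m) = j :: rem' := by
          rw [← hrem, Hrem]; rfl
        obtain ⟨hαj, hidxj, hjmem, hmin, hrem''⟩ :=
          filter_sorted_head (PySem.List.pairwise_lt_pyRange_one 0 _) hhead
        obtain ⟨hj0, hjn⟩ := PySem.List.mem_pyRange_one.mp hjmem
        have hscan : revspecialutilScan a.length a idx (a.getD i.toNat "") =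
            (PySem.List.pySetD a j (a.getD i.toNat ""), j) := by
          apply scan_spec a a.length idx _ j Hidx hidxj
          · rw [Hst j hj0 hjn]; exact hαj
          · intro m h1 h2
            rw [Hst m (by omega) (by omega)]
            exact hmin m (PySem.List.mem_pyRange_one.mpr ⟨by omega, by omega⟩) h1 h2
          · omega
        simp only [hsome_i, hsi, if_pos, hα, hscan]
        have hPj : PySem.List.pyGet? Pfull (kd.length : Int) = some j := by
          rw [HP, hrem]; exact PySem.List.pyGet?_append_length kd rem' j
        rw [PySem.List.enumerate_cons, List.foldl_cons]
        simp only [hPj, hsome_i]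
        have hstep : ((kd.length : Int) + 1) = (((kd ++ [j]).length : Nat) : Int) := by
          simp
        rw [hstep]
        apply ih (PySem.List.pySetD a j (a.getD i.toNat "")) j (kd ++ [j]) rem'
        · rw [PySem.List.pySetD_of_nonneg a _ hj0, List.length_set]; exact Hlen
        · intro m hm0 hmn
          rw [alphaAt_set a j _ hj0 m hm0 (by omega)]
          by_cases hmj : m = j
          · rw [if_pos hmj, hsi, hmj, hαj]
          · rw [if_neg hmj]; exact Hst m hm0 hmn
        · rw [HP, hrem, List.append_assoc]; rfl
        · rw [hrem'']; rfl
        · omega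
        · exact fun x hx => Hbs x (List.mem_cons_of_mem i hx)
        · rw [hrem] at Hcnt; simp [hα] at Hcnt; simpa using Hcnt
    · -- non-alpha cell: both sides skip
      have hsi : PySem.Str.strIsalpha (a.getD i.toNat "") = false := by
        rw [← hsA, Hst i hi0 hin]; simpa using hα
      simp only [hsome_i, hsi, Bool.false_eq_true, if_false, hα]
      apply ih a idx kd rem Hlen Hst HP Hrem Hidx
        (fun x hx => Hbs x (List.mem_cons_of_mem i hx))
      rw [List.filter_cons] at Hcnt
      simpa [hα] using Hcnt

theorem P_port_eq (arr : List String) :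
    (PySem.List.enumerate arr).filterMap
      (fun p => if PySem.Str.strIsalpha p.2 then some p.1 else none) =
    alphasAbove arr (-1) := by
  rw [PySem.List.enumerate_eq_map_pyRange arr "", List.filterMap_map]
  have : ((fun p : Int × String => if PySem.Str.strIsalpha p.2 then some p.1 else none) ∘
      (fun j => (j, PySem.List.pyGetD arr j ""))) =
      (fun j : Int => if PySem.Str.strIsalpha (PySem.List.pyGetD arr j "") then some j else none) := rfl
  rw [this, filterMap_if_eq_filter]
  unfold alphasAbove
  refine List.filter_congr ?_
  intro j hj
  obtain ⟨hj0, hjn⟩ := PySem.List.mem_pyRange_one.mp hj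
  have hlen : PySem.List.len arr = (arr.length : Int) := by simp
  rw [hlen] at hjn
  have : alphaAt arr j = PySem.Str.strIsalpha (PySem.List.pyGetD arr j "") := by
    unfold alphaAt PySem.List.pyGetD
    rw [alphaAt_some hj0 hjn]
    rfl
  rw [this]

  simp [show (-1 : Int) < j by omega]

theorem R_nodup_le (arr : List String) :
    ((PySem.List.pyRange ((arr.length : Int) - 1) (PySem.Int.floordiv (arr.length : Int) 2) (-1)).filter
      (fun i => alphaAt arr i)).length ≤ (alphasAbove arr (-1)).length := by
  apply List.Subperm.length_le
  apply List.Nodup.subperm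
  · apply List.Nodup.filter
    rw [PySem.List.pyRange_neg_one_eq_reverse]
    exact List.nodup_reverse.mpr (PySem.List.nodup_pyRange_one _ _)
  · intro x hx
    rw [List.mem_filter] at hx
    obtain ⟨hmem, hpx⟩ := hx
    obtain ⟨hlo, hhi⟩ := PySem.List.mem_pyRange_neg_one.mp hmem
    have hfd : 0 ≤ PySem.Int.floordiv (arr.length : Int) 2 := by
      unfold PySem.Int.floordiv
      exact Int.fdiv_nonneg (by omega) (by omega)
    unfold alphasAbove
    rw [List.mem_filter]
    refine ⟨PySem.List.mem_pyRange_one.mpr ⟨by omega, by omega⟩, ?_⟩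
    simp only [hpx, Bool.and_true]
    simp [show (-1 : Int) < x by omega]

theorem revspecialutil_eq_alt (arr : List String) :
    revspecialutil arr = revspecialutil_alt arr := by
  show (((PySem.List.pyRange ((arr.length : Int) - 1) (PySem.Int.floordiv (arr.length : Int) 2) (-1)).foldl
      (fun st i =>
        match PySem.List.pyGet? st.1 i with
        | none => st
        | some s =>
          if PySem.Str.strIsalpha s then
            revspecialutilScan st.1.length st.1 st.2 s
          else st)
      (arr, (-1 : Int))).1) = _
  rw [revspecialutil_alt]
  show _ = (PySem.List.enumerate
      ((PySem.List.pyRange ((arr.length : Int) - 1) (PySem.Int.floordiv (arr.length : Int) 2) (-1)).filter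
        (fun i => alphaAt arr i))).foldl
      (fun a p =>
        match PySem.List.pyGet? ((PySem.List.enumerate arr).filterMap
          (fun p => if PySem.Str.strIsalpha p.2 then some p.1 else none)) p.1,
          PySem.List.pyGet? a p.2 with
        | some q, some v => PySem.List.pySetD a q v
        | _, _ => a)
      arr
  rw [P_port_eq arr]
  exact main_inv arr (alphasAbove arr (-1))
    (PySem.List.pyRange ((arr.length : Int) - 1) (PySem.Int.floordiv (arr.length : Int) 2) (-1))
    arr (-1) [] (alphasAbove arr (-1))
    rfl (fun _ _ _ => rfl) rfl rfl (by omega)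
    (fun i hi => by
      obtain ⟨hlo, hhi⟩ := PySem.List.mem_pyRange_neg_one.mp hi
      have hfd : 0 ≤ PySem.Int.floordiv (arr.length : Int) 2 := by
        unfold PySem.Int.floordiv
        exact Int.fdiv_nonneg (by omega) (by omega)
      exact ⟨by omega, by omega⟩)
    (R_nodup_le arr)

-- ===== VERDICT (by name: the statement is the Claim_ definition above) =====
theorem revspecialutil_spec : Claim_equal_revspecialutil := by
  intro arr _
  unfold Spec_revspecialutil
  exact revspecialutil_eq_alt arr
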